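-- pv_equiv track=rewrite | github.com/docxology/MetaInformAnt | src/metainformant/networks/community.py | _consensus_communities
-- ===== SOURCE A (Python) =====
-- from collections import Counter, defaultdict
-- from typing import Dict, List, Optional, Set, Tuple
--
-- def _renumber_communities(communities: Dict[str, int]) -> Dict[str, int]:
--     """Renumber communities to be contiguous starting from 0."""
--     unique_comms = sorted(set(communities.values()))
--     comm_mapping = {old: new for new, old in enumerate(unique_comms)}
--
--     return {node: comm_mapping[comm] for node, comm in communities.items()}
--
-- def _consensus_communities(all_communities: List[Dict[str, int]]) -> Dict[str, int]:
--     """Create consensus partition from multiple community detections."""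
--     if not all_communities:
--         return {}
--
--     # Get all nodes
--     all_nodes = set()
--     for communities in all_communities:
--         all_nodes.update(communities.keys())
--
--     # For each node, find most common community assignment
--     consensus = {}
--     for node in all_nodes:
--         assignments = [comm.get(node, -1) for comm in all_communities]
--
--         # Find most common assignment
--         counts = Counter(assignments)
--         most_common = counts.most_common(1)[0][0]
--         consensus[node] = most_common
--
--     return _renumber_communities(consensus)
-- ===== SOURCE B (Python) =====
-- def _consensus_communities(all_communities):
--     """Consensus partition: per-node winner by a direct count-argmax scan over
--     the assignment sequence (no Counter, no sort), and contiguous renumbering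
--     by order-rank (id of v = number of distinct winners strictly below v)."""
--     if not all_communities:
--         return {}
--
--     # All nodes, in first-occurrence order across the partitions.
--     nodes = []
--     for partition in all_communities:
--         for n in partition:
--             if n not in nodes:
--                 nodes.append(n)
--
--     # Winner for one node: scan its assignment sequence left to right and keep
--     # the first value whose multiplicity is strictly greater than the best so
--     # far; this is exactly the earliest-occurring value of maximal count.
--     def winner(node):
--         assignments = [p.get(node, -1) for p in all_communities]
--         best, best_count = None, 0
--         for c in assignments:
--             cnt = assignments.count(c)
--             if cnt > best_count:
--                 best, best_count = c, cnt
--         return best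
--
--     vals = [winner(n) for n in nodes]
--
--     # Renumbering by rank: the contiguous id of a winner value v is the number
--     # of distinct winner values strictly below v.
--     distinct = set(vals)
--     return {n: sum(1 for u in distinct if u < v) for n, v in zip(nodes, vals)}
-- ===== Notes on version B (the rewrite author's own statement) =====
-- stated objective: alternative
-- what changed: Drops A's Counter/most_common machinery and the sorted-mapping renumbering entirely: B finds each node's winner by a left-to-right strict-> argmax scan using list.count over the assignment sequence, and renumbers by order-rank (id of v = number of distinct winner values strictly below v) instead of building a sorted mapping dict.
import Mathlib
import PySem

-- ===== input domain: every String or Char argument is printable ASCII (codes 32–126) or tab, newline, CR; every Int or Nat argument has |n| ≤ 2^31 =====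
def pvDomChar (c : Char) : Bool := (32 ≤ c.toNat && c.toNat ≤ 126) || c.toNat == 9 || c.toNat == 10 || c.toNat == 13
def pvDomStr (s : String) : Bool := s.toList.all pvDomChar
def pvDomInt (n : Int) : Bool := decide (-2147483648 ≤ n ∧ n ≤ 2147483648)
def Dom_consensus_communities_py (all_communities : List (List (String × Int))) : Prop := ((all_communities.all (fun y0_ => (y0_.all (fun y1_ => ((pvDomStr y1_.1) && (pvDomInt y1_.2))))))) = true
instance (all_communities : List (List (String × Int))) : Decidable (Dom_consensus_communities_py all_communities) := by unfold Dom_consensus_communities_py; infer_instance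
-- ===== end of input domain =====

-- B drops A's Counter/most_common machinery and the sorted-mapping renumbering: it finds
-- each node's winner by a left-to-right strict-> argmax scan using list.count, and
-- renumbers by order-rank (id of v = number of distinct winners strictly below v).
-- Equivalence is on the RETURN value; dict outputs are compared as dicts.

-- ===== PORT A =====
-- _renumber_communities
def pyRenumber (c : PySem.Dict String Int) : PySem.Dict String Int :=
  let unique := PySem.List.sorted (PySem.Set.ofList c.values) (fun x => x) false
  -- {old: new for new, old in enumerate(unique_comms)}
  let mapping : PySem.Dict Int Int :=
    PySem.Dict.ofList (unique.zipIdx.map (fun p => (p.1, (p.2 : Int))))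
  -- mapping[comm]: the key is always present (comm ∈ unique); getD's default is unreachable
  PySem.Dict.ofList (c.items.map (fun p => (p.1, mapping.getD p.2 0)))

def consensus_communities_py (all_communities : List (List (String × Int))) : List (String × Int) :=
  if all_communities = [] then [] else
  let ds := all_communities.map PySem.Dict.ofList
  let all_nodes := ds.foldl (fun s d => PySem.Set.update s d.keys) PySem.Set.empty
  let consensus := all_nodes.foldl (fun c node =>
      let assignments := ds.map (fun d => d.getD node (-1))
      let counts := PySem.Dict.counter assignments
      -- counts.most_common(1)[0][0]: head of the stable sort by count, descending;
      -- counts is never empty here, so headD's default is unreachable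
      let most := ((PySem.List.sorted counts.items (fun p => p.2) true).headD (0, 0)).1
      c.insert node most) PySem.Dict.empty
  (pyRenumber consensus).items

-- ===== PORT B =====
def consensus_communities_py_alt (all_communities : List (List (String × Int))) : List (String × Int) :=
  if all_communities = [] then [] else
  let ds := all_communities.map PySem.Dict.ofList
  -- all nodes in first-occurrence order; membership test is against the list built so far
  let nodes := ds.foldl (fun ns d => d.keys.foldl
      (fun ns n => if n ∈ ns then ns else ns ++ [n]) ns) ([] : List String)
  -- winner(node): strict-> argmax scan over the assignment sequence, multiplicity by
  -- list.count; best = None sentinel (unreachable: the sequence is nonempty here)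
  let winner := fun (node : String) =>
    let assignments := ds.map (fun d => d.getD node (-1))
    ((assignments.foldl (fun (acc : Option Int × Int) c =>
        let cnt : Int := assignments.count c
        if acc.2 < cnt then (some c, cnt) else acc)
      ((none : Option Int), (0 : Int))).1).getD 0
  let vals := nodes.map winner
  let distinct := PySem.Set.ofList vals
  -- {n: sum(1 for u in distinct if u < v) for n, v in zip(nodes, vals)}
  (PySem.Dict.ofList ((nodes.zip vals).map (fun p =>
      (p.1, distinct.foldl (fun acc u => if u < p.2 then acc + 1 else acc) (0 : Int))))).items

-- ===== PRECONDITION & SPEC =====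
def Spec_consensus_communities_py (all_communities : List (List (String × Int))) (out : List (String × Int)) : Prop := out = consensus_communities_py_alt all_communities
instance (all_communities : List (List (String × Int))) (out : List (String × Int)) : Decidable (Spec_consensus_communities_py all_communities out) := by unfold Spec_consensus_communities_py; infer_instance

-- ===== CLAIM (what is proved, stated in full; the proofs are below) =====
def Claim_equal_consensus_communities_py : Prop := ∀ (all_communities : List (List (String × Int))), Dom_consensus_communities_py all_communities → Spec_consensus_communities_py all_communities (consensus_communities_py all_communities)

-- ===== LEMMAS AND PROOFS =====
def gsel : Option (Int × Int) → (Int × Int) → Option (Int × Int) := fun o x =>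
  match o with
  | none => some x
  | some y => if y.2 < x.2 then some x else some y

lemma head?_insertBy (x : Int × Int) (acc : List (Int × Int)) :
    (PySem.List.insertBy (fun a b => decide (b.2 < a.2)) x acc).head? = gsel acc.head? x := by
  cases acc with
  | nil => simp [PySem.List.insertBy, gsel]
  | cons y ys =>
    simp only [PySem.List.insertBy, gsel, List.head?]
    by_cases h : y.2 < x.2 <;> simp [h]

lemma head?_foldl_insertBy (l : List (Int × Int)) : ∀ (acc : List (Int × Int)),
    (List.foldl (fun acc x => PySem.List.insertBy (fun a b => decide (b.2 < a.2)) x acc) acc l).head?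
      = List.foldl gsel acc.head? l := by
  induction l with
  | nil => intro acc; rfl
  | cons x xs ih =>
    intro acc
    simp only [List.foldl_cons]
    rw [ih, head?_insertBy]

lemma foldl_gsel_some (l : List (Int × Int)) : ∀ (y : Int × Int),
    ∃ w, List.foldl gsel (some y) l = some w := by
  induction l with
  | nil => intro y; exact ⟨y, rfl⟩
  | cons x xs ih =>
    intro y
    simp only [List.foldl_cons, gsel]
    by_cases h : y.2 < x.2
    · simp only [if_pos h]; exact ih x
    · simp only [if_neg h]; exact ih y

def ScanRel (a : Option Int × Int) (o : Option (Int × Int)) : Prop :=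
  match o with
  | none => a = (none, 0)
  | some w => a = (some w.1, w.2) ∧ 1 ≤ w.2

lemma scan_rel (l : List (Int × Int)) (hl : ∀ p ∈ l, 1 ≤ p.2) :
    ∀ (a : Option Int × Int) (o : Option (Int × Int)), ScanRel a o →
    ScanRel (List.foldl (fun acc kv => if acc.2 < kv.2 then (some kv.1, kv.2) else acc) a l)
            (List.foldl gsel o l) := by
  induction l with
  | nil => intro a o h; exact h
  | cons x xs ih =>
    intro a o h
    have hx : 1 ≤ x.2 := hl x (by simp)
    have hxs : ∀ p ∈ xs, 1 ≤ p.2 := fun p hp => hl p (by simp [hp])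
    simp only [List.foldl_cons]
    apply ih hxs
    cases o with
    | none =>
      simp only [ScanRel] at h
      subst h
      simp only [gsel]
      constructor
      · simp; omega
      · exact hx
    | some w =>
      obtain ⟨ha, hw⟩ := h
      subst ha
      simp only [gsel]
      by_cases hc : w.2 < x.2 <;> simp [ScanRel, hc] <;> omega

-- left dedup with an explicit 'seen' accumulator
def dedupL : List Int → List Int → List Int
  | _, [] => []
  | s, c :: l => if c ∈ s then dedupL s l else c :: dedupL (c :: s) l

lemma dedupL_congr : ∀ (l s s' : List Int), (∀ x, x ∈ s ↔ x ∈ s') →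
    dedupL s l = dedupL s' l := by
  intro l
  induction l with
  | nil => intro s s' _; rfl
  | cons c cs ih =>
    intro s s' h
    simp only [dedupL]
    by_cases hc : c ∈ s
    · rw [if_pos hc, if_pos ((h c).mp hc)]; exact ih s s' h
    · rw [if_neg hc, if_neg (fun hx => hc ((h c).mpr hx))]
      rw [ih (c :: s) (c :: s') (by intro x; simp [h x])]

lemma update_eq_append_dedupL : ∀ (l : List Int) (s : PySem.Set Int),
    PySem.Set.update s l = s ++ dedupL s l := by
  intro l
  induction l with
  | nil => intro s; simp [PySem.Set.update_nil, dedupL]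
  | cons c cs ih =>
    intro s
    rw [PySem.Set.update_cons]
    simp only [dedupL]
    by_cases hc : c ∈ s
    · rw [PySem.Set.add_of_mem hc, if_pos hc, ih]
    · rw [PySem.Set.add_of_not_mem hc, if_neg hc, ih]
      rw [dedupL_congr cs (s ++ [c]) (c :: s) (by intro x; simp; tauto)]
      simp

lemma ofList_eq_dedupL (l : List Int) : (PySem.Set.ofList l : List Int) = dedupL [] l := by
  have h := update_eq_append_dedupL l PySem.Set.empty
  simp only [PySem.Set.empty, List.nil_append] at h
  rw [PySem.Set.update_nil_left] at h
  exact h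

-- duplicates are no-ops for the gsel fold (the running max already dominates them)
lemma gsel_dedup (f : Int → Int) : ∀ (l s : List Int) (o : Option (Int × Int)),
    (∀ c ∈ s, ∃ w, o = some w ∧ f c ≤ w.2) →
    List.foldl gsel o (l.map (fun c => (c, f c)))
      = List.foldl gsel o ((dedupL s l).map (fun c => (c, f c))) := by
  intro l
  induction l with
  | nil => intro s o _; rfl
  | cons c cs ih =>
    intro s o h
    simp only [dedupL, List.map_cons, List.foldl_cons]
    by_cases hc : c ∈ s
    · obtain ⟨w, rfl, hle⟩ := h c hc
      rw [if_pos hc]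
      have : gsel (some w) (c, f c) = some w := by
        simp only [gsel]; rw [if_neg (by simpa using not_lt.mpr hle)]
      rw [this]
      exact ih s (some w) h
    · rw [if_neg hc]
      simp only [List.map_cons, List.foldl_cons]
      apply ih (c :: s)
      intro d hd
      cases o with
      | none =>
        simp only [gsel]
        refine ⟨(c, f c), rfl, ?_⟩
        rcases List.mem_cons.mp hd with rfl | hds
        · exact le_refl _
        · obtain ⟨w, hw, _⟩ := h d hds; exact absurd hw (by simp)
      | some w =>
        simp only [gsel]
        by_cases hlt : w.2 < (c, f c).2
        · rw [if_pos hlt]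
          refine ⟨(c, f c), rfl, ?_⟩
          rcases List.mem_cons.mp hd with rfl | hds
          · exact le_refl _
          · obtain ⟨w', hw', hle'⟩ := h d hds
            have hww : w = w' := by injection hw'
            subst hww
            exact le_of_lt (lt_of_le_of_lt hle' hlt)
        · rw [if_neg hlt]
          refine ⟨w, rfl, ?_⟩
          rcases List.mem_cons.mp hd with rfl | hds
          · simpa using not_lt.mp hlt
          · obtain ⟨w', hw', hle'⟩ := h d hds
            have hww : w = w' := by injection hw'
            exact hww ▸ hle'

-- the winner of one node: A's sorted-counter head equals B's strict-> argmax scan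
lemma winner_eq (as : List Int) (hne : as ≠ []) :
    ((PySem.List.sorted (PySem.Dict.counter as).items (fun p => p.2) true).headD (0, 0)).1
      = ((as.foldl (fun (acc : Option Int × Int) c =>
            if acc.2 < (as.count c : Int) then (some c, (as.count c : Int)) else acc)
          ((none : Option Int), (0 : Int))).1).getD 0 := by
  have hBfold : as.foldl (fun (acc : Option Int × Int) c =>
        if acc.2 < (as.count c : Int) then (some c, (as.count c : Int)) else acc)
        ((none : Option Int), (0 : Int))
      = (as.map (fun c => (c, (as.count c : Int)))).foldl
          (fun acc kv => if acc.2 < kv.2 then (some kv.1, kv.2) else acc)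
          ((none : Option Int), (0 : Int)) := by
    rw [List.foldl_map]
  have hitems : (PySem.Dict.counter as).items
      = (dedupL [] as).map (fun c => (c, (as.count c : Int))) := by
    rw [PySem.Dict.items_counter, ofList_eq_dedupL]
  have hg : List.foldl gsel none (as.map (fun c => (c, (as.count c : Int))))
      = List.foldl gsel none ((PySem.Dict.counter as).items) := by
    rw [hitems]
    exact gsel_dedup _ as [] none (by intro c hc; simp at hc)
  obtain ⟨a0, as', rfl⟩ : ∃ a0 as', as = a0 :: as' := by
    cases as with | nil => exact absurd rfl hne | cons a b => exact ⟨a, b, rfl⟩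
  set as := a0 :: as'
  obtain ⟨w, hw⟩ : ∃ w, List.foldl gsel none (as.map (fun c => (c, (as.count c : Int)))) = some w := by
    simp only [as, List.map_cons, List.foldl_cons, gsel]
    exact foldl_gsel_some _ _
  have hpos : ∀ p ∈ as.map (fun c => (c, (as.count c : Int))), 1 ≤ p.2 := by
    intro p hp
    obtain ⟨c, hc, rfl⟩ := List.mem_map.mp hp
    have := List.count_pos_iff.mpr hc
    simp only []
    omega
  have hscan := scan_rel _ hpos ((none : Option Int), (0 : Int)) none rfl
  rw [hw] at hscan
  obtain ⟨ha, _⟩ := hscan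
  have hsort : (PySem.List.sorted (PySem.Dict.counter as).items (fun p => p.2) true).head? = some w := by
    rw [PySem.List.sorted_rev_eq_foldl_insertBy]
    have h2 := head?_foldl_insertBy ((PySem.Dict.counter as).items) []
    rw [h2, List.head?_nil, ← hg, hw]
  rw [hBfold, ha]
  cases hs : PySem.List.sorted (PySem.Dict.counter as).items (fun p => p.2) true with
  | nil => rw [hs] at hsort; simp at hsort
  | cons z zs =>
    rw [hs] at hsort
    simp only [List.head?] at hsort
    injection hsort with hz
    subst hz
    rfl

-- B's node-collection loop is A's set union
lemma nodes_update (l : List String) : ∀ (s : List String),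
    l.foldl (fun ns n => if n ∈ ns then ns else ns ++ [n]) s = PySem.Set.update s l := by
  induction l with
  | nil => intro s; simp [PySem.Set.update_nil]
  | cons c cs ih =>
    intro s
    rw [PySem.Set.update_cons]
    simp only [List.foldl_cons]
    by_cases hc : c ∈ s
    · rw [if_pos hc, PySem.Set.add_of_mem hc, ih]
    · rw [if_neg hc, PySem.Set.add_of_not_mem hc, ih]

lemma all_nodes_nodup (ds : List (PySem.Dict String Int)) :
    ∀ (s : PySem.Set String), s.Nodup → (ds.foldl (fun s d => PySem.Set.update s d.keys) s).Nodup := by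
  induction ds with
  | nil => intro s hs; exact hs
  | cons d ds ih =>
    intro s hs
    exact ih _ (PySem.Set.nodup_update s d.keys hs)

lemma zip_self_map {α β : Type} (g : α → β) (l : List α) :
    l.zip (l.map g) = l.map (fun a => (a, g a)) := by
  induction l with
  | nil => rfl
  | cons a t ih => simp [ih]

lemma items_ofList {κ ν : Type} [BEq κ] [LawfulBEq κ] (l : List (κ × ν))
    (h : (l.map Prod.fst).Nodup) : (PySem.Dict.ofList l).items = l := by
  have hrep : PySem.Dict.ofList l
      = List.foldl (fun d (a : κ × ν) => d.insert a.1 a.2) PySem.Dict.empty l := rfl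
  rw [hrep, PySem.Dict.items_foldl_insert_fresh l Prod.fst Prod.snd PySem.Dict.empty
      (fun a _ => PySem.Dict.contains_empty a.1) h]
  have hemp : (PySem.Dict.empty : PySem.Dict κ ν).items = [] := rfl
  rw [hemp, List.nil_append]
  simp

-- in a strictly increasing list, the number of elements below u[j] is j
lemma countP_lt_getElem : ∀ (u : List Int), u.Pairwise (· < ·) →
    ∀ (j : Nat) (hj : j < u.length), u.countP (fun x => decide (x < u[j])) = j := by
  intro u
  induction u with
  | nil => intro _ j hj; simp at hj
  | cons a t ih =>
    intro hp j hj
    have ha : ∀ x ∈ t, a < x := fun x hx => (List.pairwise_cons.mp hp).1 x hx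
    have ht : t.Pairwise (· < ·) := (List.pairwise_cons.mp hp).2
    cases j with
    | zero =>
      simp only [List.getElem_cons_zero, List.countP_cons]
      rw [List.countP_eq_zero.mpr (by intro x hx; simpa using not_lt.mpr (le_of_lt (ha x hx)))]
      simp
    | succ j' =>
      have hj' : j' < t.length := by simpa using hj
      simp only [List.getElem_cons_succ, List.countP_cons]
      have h2 : a < t[j'] := ha _ (List.getElem_mem hj')
      have key : ∀ (x : Int), a < x → List.countP (fun y => decide (y < x)) t = j' →
          (List.countP (fun y => decide (y < x)) t + if decide (a < x) = true then 1 else 0) = j' + 1 := by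
        intro x hx hcnt; simp [hx, hcnt]
      exact key t[j'] h2 (ih ht j' hj')

-- the sorted-enumerate mapping looks up the order-rank
lemma mapping_getD_rank (u : List Int) (hu : u.Pairwise (· < ·)) (v : Int) (hv : v ∈ u) :
    (PySem.Dict.ofList (u.zipIdx.map (fun p => (p.1, (p.2 : Int))))).getD v 0
      = (u.countP (fun x => decide (x < v)) : Int) := by
  obtain ⟨j, hj, rfl⟩ := List.mem_iff_getElem.mp hv
  have hnd : u.Nodup := hu.imp (fun h => ne_of_lt h)
  have hlen : j < (u.zipIdx).length := by simpa using hj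
  have hz : (u[j], j) ∈ u.zipIdx := by
    have hget := List.getElem_zipIdx (l := u) (j := 0) (i := j) hlen
    have := List.getElem_mem hlen
    rw [hget] at this
    simpa using this
  have hmem : (u[j], (j : Int)) ∈ (u.zipIdx.map (fun p => (p.1, (p.2 : Int)))) :=
    List.mem_map.mpr ⟨(u[j], j), hz, rfl⟩
  have hfst : ((u.zipIdx.map (fun p => (p.1, (p.2 : Int)))).map Prod.fst).Nodup := by
    have : (u.zipIdx.map (fun p => (p.1, (p.2 : Int)))).map Prod.fst = u := by
      rw [List.map_map]
      exact List.zipIdx_map_fst 0 u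
    rw [this]; exact hnd
  have hitems := items_ofList _ hfst
  have hgd := PySem.Dict.getD_of_mem_items (PySem.Dict.ofList (u.zipIdx.map (fun p => (p.1, (p.2 : Int)))))
      (hitems ▸ hmem) (PySem.Dict.nodup_keys_ofList _) 0
  rw [hgd, countP_lt_getElem u hu j hj]

-- normal forms of the two ports (proof-only helpers)
def Nf (ds : List (PySem.Dict String Int)) : List String :=
  ds.foldl (fun s d => PySem.Set.update s d.keys) PySem.Set.empty

def wAf (ds : List (PySem.Dict String Int)) (n : String) : Int :=
  ((PySem.List.sorted (PySem.Dict.counter (ds.map (fun d => d.getD n (-1)))).items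
      (fun p => p.2) true).headD (0, 0)).1

def wBf (ds : List (PySem.Dict String Int)) (n : String) : Int :=
  (((ds.map (fun d => d.getD n (-1))).foldl (fun (acc : Option Int × Int) c =>
      if acc.2 < ((ds.map (fun d => d.getD n (-1))).count c : Int)
      then (some c, ((ds.map (fun d => d.getD n (-1))).count c : Int)) else acc)
    ((none : Option Int), (0 : Int))).1).getD 0

def uof (vals : List Int) : List Int :=
  PySem.List.sorted (PySem.Set.ofList vals) (fun x => x) false

lemma A_normal (xs : List (List (String × Int))) (h : xs ≠ []) :
    consensus_communities_py xs
      = (Nf (xs.map PySem.Dict.ofList)).map (fun n => (n,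
          (PySem.Dict.ofList ((uof ((Nf (xs.map PySem.Dict.ofList)).map
              (fun m => wAf (xs.map PySem.Dict.ofList) m))).zipIdx.map (fun p => (p.1, (p.2 : Int))))).getD
            (wAf (xs.map PySem.Dict.ofList) n) 0)) := by
  simp only [consensus_communities_py, pyRenumber, if_neg h, Nf, wAf, uof]
  set ds := xs.map PySem.Dict.ofList with hds
  set N := List.foldl (fun s d => PySem.Set.update s d.keys) PySem.Set.empty ds with hN
  have hNnodup : N.Nodup := all_nodes_nodup ds PySem.Set.empty List.nodup_nil
  have hC := PySem.Dict.items_foldl_insert_fresh N (fun n : String => n)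
      (fun n => ((PySem.List.sorted (PySem.Dict.counter (ds.map (fun d => d.getD n (-1)))).items
        (fun p => p.2) true).headD (0, 0)).1) PySem.Dict.empty
      (fun a _ => PySem.Dict.contains_empty a) (by simpa using hNnodup)
  have hemp : (PySem.Dict.empty : PySem.Dict String Int).items = [] := rfl
  rw [hemp, List.nil_append] at hC
  rw [hC]
  have hV : (List.foldl (fun c node => c.insert node
      ((PySem.List.sorted (PySem.Dict.counter (ds.map (fun d => d.getD node (-1)))).items
        (fun p => p.2) true).headD (0, 0)).1) PySem.Dict.empty N).values
      = N.map (fun n => ((PySem.List.sorted (PySem.Dict.counter (ds.map (fun d => d.getD n (-1)))).items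
        (fun p => p.2) true).headD (0, 0)).1) := by
    simp only [PySem.Dict.values, hC, List.map_map]
    rfl
  rw [hV, List.map_map]
  rw [items_ofList _ (by simpa [Function.comp_def] using hNnodup)]
  simp [Function.comp_def]

lemma B_normal (xs : List (List (String × Int))) (h : xs ≠ []) :
    consensus_communities_py_alt xs
      = (Nf (xs.map PySem.Dict.ofList)).map (fun n => (n,
          (List.countP (fun u => decide (u < wBf (xs.map PySem.Dict.ofList) n))
            (PySem.Set.ofList ((Nf (xs.map PySem.Dict.ofList)).map
              (fun m => wBf (xs.map PySem.Dict.ofList) m))) : Int))) := by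
  simp only [consensus_communities_py_alt, if_neg h, Nf, wBf]
  set ds := xs.map PySem.Dict.ofList with hds
  have hnodes : List.foldl (fun ns d => List.foldl
        (fun ns n => if n ∈ ns then ns else ns ++ [n]) ns d.keys) ([] : List String) ds
      = List.foldl (fun s d => PySem.Set.update s d.keys) PySem.Set.empty ds := by
    simp only [nodes_update]
    rfl
  rw [hnodes]
  set N := List.foldl (fun s d => PySem.Set.update s d.keys) PySem.Set.empty ds with hN
  have hNnodup : N.Nodup := all_nodes_nodup ds PySem.Set.empty List.nodup_nil
  rw [zip_self_map, List.map_map]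
  rw [items_ofList _ (by simpa [Function.comp_def] using hNnodup)]
  simp only [PySem.List.foldl_ite_add_one, zero_add]
  simp only [Function.comp_def]
  apply List.map_congr_left
  intro a _
  rfl

-- ===== VERDICT (by name: the statement is the Claim_ definition above) =====
theorem consensus_communities_py_spec : Claim_equal_consensus_communities_py := by
  intro xs _hdom
  unfold Spec_consensus_communities_py
  by_cases hxs : xs = []
  · simp [consensus_communities_py, consensus_communities_py_alt, hxs]
  · rw [A_normal xs hxs, B_normal xs hxs]
    set ds := xs.map PySem.Dict.ofList with hds
    have hdsne : ds ≠ [] := by simp [hds, hxs]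
    have hw : wAf ds = wBf ds := by
      funext n
      unfold wAf wBf
      exact winner_eq (ds.map (fun d => d.getD n (-1))) (by simp [hdsne])
    rw [← hw]
    apply List.map_congr_left
    intro n hn
    have hvmem : wAf ds n ∈ (Nf ds).map (fun m => wAf ds m) := List.mem_map_of_mem hn
    have humem : wAf ds n ∈ uof ((Nf ds).map (fun m => wAf ds m)) := by
      rw [uof, PySem.List.mem_sorted]
      exact (PySem.Set.mem_ofList _ _).mpr hvmem
    have hpair : (uof ((Nf ds).map (fun m => wAf ds m))).Pairwise (· < ·) := by
      rw [uof]
      exact PySem.List.sorted_ofList_pairwise_lt _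
    rw [mapping_getD_rank _ hpair _ humem]
    have hperm : (uof ((Nf ds).map (fun m => wAf ds m))).Perm
        (PySem.Set.ofList ((Nf ds).map (fun m => wAf ds m))) := by
      rw [uof]
      exact PySem.List.sorted_perm _ _ _
    rw [hperm.countP_eq]
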